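-- pv_equiv track=rewrite | github.com/yogan/advent-of-code | 2023/day-03/day03.py | find_part_numbers
-- ===== SOURCE A (Python) =====
-- def find_part_numbers(lines):
--     part_numbers = []
--
--     for row, line in enumerate(lines):
--         cur_num_str = ""
--         start_col = None
--         end_col = None
--         for col, char in enumerate(line):
--             if char.isdigit():
--                 cur_num_str += char
--                 if start_col is None:
--                     start_col = col
--                 end_col = col
--                 if col == len(line) - 1:
--                     part_numbers.append((int(cur_num_str), row, start_col, end_col))
--                     cur_num_str = ""
--                     start_col = None
--                     end_col = None
--             else:
--                 if cur_num_str != "":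
--                     part_numbers.append((int(cur_num_str), row, start_col, end_col))
--                     cur_num_str = ""
--                     start_col = None
--                     end_col = None
--                 pass
--
--     return part_numbers
-- ===== SOURCE B (Python) =====
-- def find_part_numbers(lines):
--     # Run-scanning: find each maximal digit run with an index scan,
--     # slice it out once, instead of A's per-character accumulator state machine.
--     result = []
--     for row, line in enumerate(lines):
--         i, n = 0, len(line)
--         while i < n:
--             if line[i].isdigit():
--                 j = i
--                 while j + 1 < n and line[j + 1].isdigit():
--                     j += 1
--                 result.append((int(line[i:j + 1]), row, i, j))
--                 i = j + 1
--             else: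
--                 i += 1
--     return result
-- ===== Notes on version B (the rewrite author's own statement) =====
-- stated objective: alternative
-- what changed: Replaces A's per-character accumulator state machine (growing string, start/end sentinels, end-of-line flush) with an index scan that locates each maximal digit run, slices it out once and emits the tuple directly.
import Mathlib
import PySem

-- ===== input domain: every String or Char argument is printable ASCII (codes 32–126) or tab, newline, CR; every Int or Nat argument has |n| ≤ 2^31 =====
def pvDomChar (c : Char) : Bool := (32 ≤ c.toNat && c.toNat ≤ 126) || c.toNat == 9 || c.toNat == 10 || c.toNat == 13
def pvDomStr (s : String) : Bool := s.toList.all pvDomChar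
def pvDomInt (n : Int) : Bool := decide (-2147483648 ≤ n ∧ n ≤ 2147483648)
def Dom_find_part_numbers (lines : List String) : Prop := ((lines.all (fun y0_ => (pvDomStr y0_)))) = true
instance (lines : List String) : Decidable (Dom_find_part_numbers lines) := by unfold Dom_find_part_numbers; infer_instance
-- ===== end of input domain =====

-- B replaces A's per-character accumulator state machine with an index scan over maximal
-- digit runs; same return value, no side effects in either version.

-- int(s) on a digit-run string; exact here: both ports only apply it to nonempty ASCII digit runs
def pvIntOf (cs : List Char) : Int := (PySem.Int.ofChars? cs).getD 0

-- ===== PORT A =====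
-- the inner `for col, char in enumerate(line)` loop with its mutable state, transcribed as recursion
def pvALoop (row n : Int) (cur : List Char) (sc ec : Option Int)
    (acc : List (Int × Int × Int × Int)) :
    List (Int × Char) → List (Int × Int × Int × Int)
  | [] => acc
  | (col, ch) :: rest =>
    if PySem.Chars.isdigit ch then
      let cur' := cur ++ [ch]
      let sc' := if sc = none then some col else sc
      let ec' := some col
      if col = n - 1 then
        pvALoop row n [] none none (acc ++ [(pvIntOf cur', row, sc'.getD 0, ec'.getD 0)]) rest
      else
        pvALoop row n cur' sc' ec' acc rest
    else
      if cur ≠ [] then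
        pvALoop row n [] none none (acc ++ [(pvIntOf cur, row, sc.getD 0, ec.getD 0)]) rest
      else
        pvALoop row n cur sc ec acc rest

def find_part_numbers (lines : List String) : List (Int × Int × Int × Int) :=
  (PySem.List.enumerate lines 0).foldl
    (fun acc p =>
      pvALoop p.1 (PySem.Str.len p.2) [] none none acc (PySem.List.enumerate p.2.toList 0)) []

-- ===== PORT B =====
-- Source B's index scan: the inner `while j+1 < n and line[j+1].isdigit()` extension is the
-- takeWhile over the remaining characters, `i = j + 1` is the dropWhile jump.
def pvBRuns (row : Int) : Int → List Char → List (Int × Int × Int × Int)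
  | _, [] => []
  | col, c :: rest =>
    if PySem.Chars.isdigit c then
      let run := c :: rest.takeWhile PySem.Chars.isdigit
      (pvIntOf run, row, col, col + run.length - 1)
        :: pvBRuns row (col + run.length) (rest.dropWhile PySem.Chars.isdigit)
    else
      pvBRuns row (col + 1) rest
termination_by _ cs => cs.length
decreasing_by
  · simpa using Nat.lt_succ_of_le (List.length_dropWhile_le _ _)
  · simp

def find_part_numbers_alt (lines : List String) : List (Int × Int × Int × Int) :=
  (PySem.List.enumerate lines 0).foldl
    (fun acc p => acc ++ pvBRuns p.1 0 p.2.toList) []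

-- ===== PRECONDITION & SPEC =====
def Spec_find_part_numbers (lines : List String) (out : List (Int × Int × Int × Int)) : Prop := out = find_part_numbers_alt lines
instance (lines : List String) (out : List (Int × Int × Int × Int)) : Decidable (Spec_find_part_numbers lines out) := by unfold Spec_find_part_numbers; infer_instance

-- ===== CLAIM (what is proved, stated in full; the proofs are below) =====
def Claim_equal_find_part_numbers : Prop := ∀ (lines : List String), Dom_find_part_numbers lines → Spec_find_part_numbers lines (find_part_numbers lines)

-- ===== LEMMAS AND PROOFS =====

-- Clean-state and mid-run invariants of A's loop versus B's run scan, proved together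
-- by strong induction on the remaining characters.
lemma pvBoth (row n : Int) : ∀ (m : Nat) (cs : List Char), cs.length = m →
    (∀ (i : Int) (acc : List (Int × Int × Int × Int)), i + cs.length = n →
      pvALoop row n [] none none acc (PySem.List.enumerate cs i) = acc ++ pvBRuns row i cs) ∧
    (∀ (i : Int) (cur : List Char) (s : Int) (acc : List (Int × Int × Int × Int)),
      cur ≠ [] → cs ≠ [] → i + cs.length = n →
      pvALoop row n cur (some s) (some (i - 1)) acc (PySem.List.enumerate cs i)
        = acc ++ (pvIntOf (cur ++ cs.takeWhile PySem.Chars.isdigit), row, s,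
                  i + (cs.takeWhile PySem.Chars.isdigit).length - 1)
            :: pvBRuns row (i + (cs.takeWhile PySem.Chars.isdigit).length)
                 (cs.dropWhile PySem.Chars.isdigit)) := by
  intro m
  induction m using Nat.strong_induction_on with
  | _ m ih =>
    intro cs hm
    cases cs with
    | nil =>
      refine ⟨fun i acc _ => ?_, fun i cur s acc _ hne _ => absurd rfl hne⟩
      simp [PySem.List.enumerate_nil, pvALoop, pvBRuns]
    | cons c rest =>
      have hrl : rest.length < m := by simp at hm; omega
      obtain ⟨ihc, ihr⟩ := ih rest.length hrl rest rfl
      constructor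
      · -- clean state
        intro i acc hlen
        rw [PySem.List.enumerate_cons]
        by_cases hd : PySem.Chars.isdigit c = true
        · by_cases hlast : i = n - 1
          · have hre : rest = [] := by
              have := hlen; simp at this
              cases rest with
              | nil => rfl
              | cons r rs => exfalso; simp at this; omega
            subst hre
            simp only [pvALoop, hd, if_true, hlast]
            simp [PySem.List.enumerate_nil, pvALoop, pvBRuns, hd]
          · have hre : rest ≠ [] := by
              intro h; subst h; simp at hlen; omega
            simp only [pvALoop, hd, if_true, if_neg hlast]
            have := ihr (i + 1) [c] i acc (by simp) hre (by simp at hlen ⊢; omega)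
            simp only [add_sub_cancel_right] at this
            simp only [List.nil_append]
            rw [this]
            simp only [pvBRuns, hd, if_true, List.singleton_append, List.length_cons]
            push_cast
            ring_nf
        · simp only [pvALoop, hd]
          rw [ihc (i + 1) acc (by simp at hlen ⊢; omega)]
          simp only [pvBRuns, hd]
          rfl
      · -- mid-run state
        intro i cur s acc hcur _ hlen
        rw [PySem.List.enumerate_cons]
        by_cases hd : PySem.Chars.isdigit c = true
        · by_cases hlast : i = n - 1
          · have hre : rest = [] := by
              cases rest with
              | nil => rfl
              | cons r rs => exfalso; simp at hlen; omega
            subst hre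
            simp only [pvALoop, hd, if_true, hlast]
            simp [PySem.List.enumerate_nil, pvALoop, pvBRuns, hd]
          · have hre : rest ≠ [] := by
              intro h; subst h; simp at hlen; omega
            have hsc : (if (some s : Option Int) = none then some i else some s) = some s := by simp
            simp only [pvALoop, hd, if_true, if_neg hlast, hsc]
            have := ihr (i + 1) (cur ++ [c]) s acc (by simp) hre (by simp at hlen ⊢; omega)
            simp only [add_sub_cancel_right] at this
            rw [this]
            simp only [List.takeWhile_cons_of_pos hd, List.dropWhile_cons_of_pos hd,
              List.append_assoc, List.singleton_append, List.length_cons]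
            push_cast
            ring_nf
        · simp only [pvALoop]
          rw [if_neg hd, if_pos hcur]
          simp only [Option.getD_some]
          rw [ihc (i + 1) (acc ++ [(pvIntOf cur, row, s, i - 1)]) (by simp at hlen ⊢; omega)]
          have hd' : PySem.Chars.isdigit c = false := by simpa using hd
          simp only [List.takeWhile_cons, List.dropWhile_cons, hd', Bool.false_eq_true, if_false,
            List.length_nil, Nat.cast_zero, add_zero, List.append_nil, pvBRuns]
          simp

lemma pvLine (row : Int) (cs : List Char) (acc : List (Int × Int × Int × Int)) :
    pvALoop row (cs.length : Int) [] none none acc (PySem.List.enumerate cs 0)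
      = acc ++ pvBRuns row 0 cs := by
  exact ((pvBoth row (cs.length : Int) cs.length cs rfl).1 0 acc (by simp))

lemma pvOuter : ∀ (ps : List (Int × String)) (acc : List (Int × Int × Int × Int)),
    ps.foldl (fun acc p =>
        pvALoop p.1 (PySem.Str.len p.2) [] none none acc (PySem.List.enumerate p.2.toList 0)) acc
    = ps.foldl (fun acc p => acc ++ pvBRuns p.1 0 p.2.toList) acc := by
  intro ps
  induction ps with
  | nil => intro acc; rfl
  | cons p ps ih =>
    intro acc
    simp only [List.foldl_cons]
    rw [show PySem.Str.len p.2 = (p.2.toList.length : Int) by simp [PySem.Str.len_eq], pvLine, ih]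

-- ===== VERDICT (by name: the statement is the Claim_ definition above) =====
theorem find_part_numbers_spec : Claim_equal_find_part_numbers := by
  intro lines _
  unfold Spec_find_part_numbers find_part_numbers find_part_numbers_alt
  exact pvOuter _ _
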